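-- pv_equiv track=rewrite | github.com/PMEAL/OpenPNM | openpnm/utils/misc.py | is_valid_propname
-- ===== SOURCE A (Python) =====
-- def is_valid_propname(propname):
--     r"""
--     Check if ``propname`` is a valid OpenPNM propname, i.e. starts with
--     'pore.' or 'throat.'
--
--     Parameters
--     ----------
--     propname : str
--         Property name to check whether it's a valid OpenPNM propname.
--
--     Returns
--     -------
--     bool
--         Whether or not ``propname`` is a valid name
--
--     """
--     if not isinstance(propname, str):
--         return False
--     temp = propname.split(".")
--     if temp[0] not in ["pore", "throat"]:
--         return False
--     if len(temp) == 1: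
--         return False
--     for field in temp:
--         if len(field) == 0:
--             return False
--     return True
-- ===== SOURCE B (Python) =====
-- def is_valid_propname(propname):
--     if not isinstance(propname, str):
--         return False
--     return ((propname.startswith("pore.") or propname.startswith("throat."))
--             and ".." not in propname
--             and not propname.endswith("."))
-- ===== Notes on version B (the rewrite author's own statement) =====
-- stated objective: simpler
-- what changed: Replaced split('.')+membership+per-field emptiness loop by three direct substring tests: prefix 'pore.'/'throat.', no '..' anywhere, no trailing '.'.
import Mathlib
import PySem

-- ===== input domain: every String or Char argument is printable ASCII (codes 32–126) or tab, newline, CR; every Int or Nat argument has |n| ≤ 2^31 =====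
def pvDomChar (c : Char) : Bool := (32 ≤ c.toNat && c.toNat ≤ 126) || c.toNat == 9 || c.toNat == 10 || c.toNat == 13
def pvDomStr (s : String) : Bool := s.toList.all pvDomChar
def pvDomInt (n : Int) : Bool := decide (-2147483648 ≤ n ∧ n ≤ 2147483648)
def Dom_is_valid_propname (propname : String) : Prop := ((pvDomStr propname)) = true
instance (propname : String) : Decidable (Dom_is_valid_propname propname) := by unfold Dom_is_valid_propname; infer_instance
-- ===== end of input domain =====

-- B replaces A's split('.') + membership + per-field loop by three direct substring tests (simpler, no split).

-- ===== PORT A =====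
-- temp = propname.split("."); temp[0] is always safe: str.split never returns an empty list,
-- so temp[0] is ported as headI (the head of a list that is provably nonempty).
def is_valid_propname (propname : String) : Bool :=
  let temp := PySem.Chars.splitOn propname.toList ['.']
  if !(temp.headI == "pore".toList || temp.headI == "throat".toList) then false
  else if temp.length == 1 then false
  else if temp.any (fun field => field.length == 0) then false  -- the for-loop with early `return False`
  else true

-- ===== PORT B =====
def is_valid_propname_alt (propname : String) : Bool :=
  (PySem.Str.startswith propname "pore." || PySem.Str.startswith propname "throat.")
    && !(PySem.Str.isIn ".." propname)
    && !(PySem.Str.endswith propname ".")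

-- ===== PRECONDITION & SPEC =====
def Spec_is_valid_propname (propname : String) (out : Bool) : Prop := out = is_valid_propname_alt propname
instance (propname : String) (out : Bool) : Decidable (Spec_is_valid_propname propname out) := by unfold Spec_is_valid_propname; infer_instance

-- ===== CLAIM (what is proved, stated in full; the proofs are below) =====
def Claim_equal_is_valid_propname : Prop := ∀ (propname : String), Dom_is_valid_propname propname → Spec_is_valid_propname propname (is_valid_propname propname)

-- ===== LEMMAS AND PROOFS =====

def pvSegs (d : Char) : List Char → List (List Char)
  | [] => [[]]
  | c :: cs =>
    let r := pvSegs d cs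
    if c = d then [] :: r else (c :: r.headI) :: r.tail

theorem pvSegs_ne_nil (d : Char) (cs : List Char) : pvSegs d cs ≠ [] := by
  cases cs with
  | nil => simp [pvSegs]
  | cons c cs => simp only [pvSegs]; split <;> simp

theorem pvSegs_headI_cons_tail (d : Char) (cs : List Char) :
    (pvSegs d cs).headI :: (pvSegs d cs).tail = pvSegs d cs := by
  cases h : pvSegs d cs with
  | nil => exact absurd h (pvSegs_ne_nil d cs)
  | cons a t => simp

theorem splitOn_go_eq_pvSegs (d : Char) (fuel : Nat) (l cur : List Char)
    (acc : List (List Char)) (h : l.length < fuel) :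
    PySem.Chars.splitOn.go [d] fuel l cur acc =
      acc.reverse ++ ((cur.reverse ++ (pvSegs d l).headI) :: (pvSegs d l).tail) := by
  induction fuel generalizing l cur acc with
  | zero => omega
  | succ f ih =>
    cases l with
    | nil => simp [PySem.Chars.splitOn.go, pvSegs]
    | cons c rest =>
      rw [PySem.Chars.splitOn.go]
      by_cases hc : c = d
      · subst hc
        have hpre : [c].isPrefixOf (c :: rest) = true := by simp [List.isPrefixOf]
        rw [if_pos hpre]
        simp only [List.length_cons, List.length_nil, Nat.zero_add, List.drop_succ_cons, List.drop_zero]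
        rw [ih rest [] ((cur.reverse) :: acc) (by simpa using Nat.lt_of_succ_lt_succ h)]
        simp [pvSegs, pvSegs_headI_cons_tail]
      · have hpre : [d].isPrefixOf (c :: rest) = false := by
          simp [List.isPrefixOf]; intro hh; exact absurd hh.symm hc
        rw [if_neg (by simp [hpre])]
        rw [ih rest (c :: cur) acc (by simpa using Nat.lt_of_succ_lt_succ h)]
        simp [pvSegs, hc]

theorem splitOn_eq_pvSegs (d : Char) (cs : List Char) :
    PySem.Chars.splitOn cs [d] = pvSegs d cs := by
  rw [PySem.Chars.splitOn, splitOn_go_eq_pvSegs d _ _ _ _ (by omega)]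
  simp [pvSegs_headI_cons_tail]

theorem pvSegs_headI (d : Char) (cs : List Char) :
    (pvSegs d cs).headI = cs.takeWhile (· ≠ d) := by
  induction cs with
  | nil => simp [pvSegs]
  | cons c cs ih =>
    by_cases hc : c = d <;> simp [pvSegs, hc, ih]

theorem infix_dd_cons (d c : Char) (rest : List Char) :
    [d, d] <:+: (c :: rest) ↔ (c = d ∧ [d] <+: rest) ∨ [d, d] <:+: rest := by
  rw [List.infix_cons_iff]
  constructor
  · rintro (h | h)
    · left
      rcases h with ⟨t, ht⟩
      simp only [List.cons_append, List.cons.injEq] at ht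
      obtain ⟨h1, h2⟩ := ht
      exact ⟨h1.symm, by rw [← h2]; exact ⟨t, by simp⟩⟩
    · right; exact h
  · rintro (⟨hc, t, ht⟩ | h)
    · left; exact ⟨t, by simp [hc, ← ht]⟩
    · right; exact h

theorem singleton_suffix_iff (d : Char) (cs : List Char) :
    [d] <:+ cs ↔ cs.getLast? = some d := by
  induction cs with
  | nil => simp
  | cons c rest ih =>
    cases rest with
    | nil => simp [List.suffix_cons_iff, eq_comm]
    | cons b t =>
      rw [List.getLast?_cons_cons, ← ih, List.suffix_cons_iff]
      simp

theorem getLast?_cons_ne_nil (c : Char) (rest : List Char) (h : rest ≠ []) :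
    (c :: rest).getLast? = rest.getLast? := by
  cases rest with
  | nil => exact absurd rfl h
  | cons b t => rw [List.getLast?_cons_cons]

theorem suffix_singleton_cons (d c : Char) (rest : List Char) (h : rest ≠ []) :
    [d] <:+ (c :: rest) ↔ [d] <:+ rest := by
  rw [singleton_suffix_iff, singleton_suffix_iff, getLast?_cons_ne_nil c rest h]

theorem pvSegs_tail_all (d : Char) (cs : List Char) :
    ((pvSegs d cs).tail.all fun f => !f.isEmpty) = true ↔
      (¬ [d, d] <:+: cs ∧ (cs = [] ∨ ¬ [d] <:+ cs)) := by
  induction cs with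
  | nil => simp [pvSegs]
  | cons c rest ih =>
    by_cases hc : c = d
    · subst hc
      have hsplit : (pvSegs c (c :: rest)).tail = pvSegs c rest := by simp [pvSegs]
      rw [hsplit, ← pvSegs_headI_cons_tail c rest]
      cases hr : rest with
      | nil =>
        subst hr
        simp [pvSegs]
      | cons b t =>
        rw [← hr]
        have hne : rest ≠ [] := by simp [hr]
        simp only [List.all_cons, Bool.and_eq_true, ih, pvSegs_headI]
        rw [infix_dd_cons, suffix_singleton_cons c c rest hne]
        constructor
        · rintro ⟨h1, h2, h3⟩
          have h3' : ¬ [c] <:+ rest := by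
            rcases h3 with h3 | h3
            · exact absurd h3 hne
            · exact h3
          refine ⟨?_, Or.inr h3'⟩
          rintro (⟨-, hp⟩ | hi)
          · rcases hp with ⟨t2, ht2⟩
            rw [← ht2] at h1
            simp at h1
          · exact h2 hi
        · rintro ⟨h1, h2⟩
          have h2' : ¬ [c] <:+ rest := by
            rcases h2 with h2 | h2
            · exact absurd h2 (by simp)
            · exact h2
          refine ⟨?_, fun hi => h1 (Or.inr hi), Or.inr h2'⟩
          cases hrr : rest with
          | nil => exact absurd hrr hne
          | cons b' t' =>
            by_cases hb : b' = c
            · exact absurd (Or.inl ⟨rfl, by rw [hrr]; exact ⟨t', by simp [hb]⟩⟩) h1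
            · simp [hb]
    · have hsplit : (pvSegs d (c :: rest)).tail = (pvSegs d rest).tail := by simp [pvSegs, hc]
      rw [hsplit, ih, infix_dd_cons]
      cases hr : rest with
      | nil =>
        subst hr
        simp [singleton_suffix_iff]
        exact fun h => hc h
      | cons b t =>
        rw [← hr]
        have hne : rest ≠ [] := by simp [hr]
        rw [suffix_singleton_cons d c rest hne]
        constructor
        · rintro ⟨h1, h2⟩
          have h2' : ¬ [d] <:+ rest := by
            rcases h2 with h2 | h2
            · exact absurd h2 hne
            · exact h2
          exact ⟨fun hh => by rcases hh with ⟨he, -⟩ | hi; exact hc he; exact h1 hi, Or.inr h2'⟩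
        · rintro ⟨h1, h2⟩
          have h2' : ¬ [d] <:+ rest := by
            rcases h2 with h2 | h2
            · exact absurd h2 (by simp)
            · exact h2
          exact ⟨fun hi => h1 (Or.inr hi), Or.inr h2'⟩

theorem prefix_iff_takeWhile (d : Char) (w cs : List Char) (hw : ∀ c ∈ w, c ≠ d) :
    (w ++ [d]) <+: cs ↔ (cs.takeWhile (· ≠ d) = w ∧ d ∈ cs) := by
  induction w generalizing cs with
  | nil =>
    cases cs with
    | nil => simp
    | cons c cs' =>
      by_cases hc : c = d
      · subst hc
        simp [List.cons_prefix_cons]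
      · simp [List.cons_prefix_cons, hc]
        exact fun h => hc h.symm
  | cons a w' ih =>
    have ha : a ≠ d := hw a (by simp)
    cases cs with
    | nil => simp
    | cons c cs' =>
      by_cases hc : c = d
      · subst hc
        constructor
        · rintro h
          rw [List.cons_append, List.cons_prefix_cons] at h
          exact absurd h.1 ha
        · rintro ⟨h, -⟩
          rw [List.takeWhile_cons, if_neg (by simp)] at h
          exact absurd h (by simp)
      · rw [List.cons_append, List.cons_prefix_cons, List.takeWhile_cons, if_pos (by simp [hc]),
            ih cs' (fun x hx => hw x (by simp [hx])), List.mem_cons]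
        constructor
        · rintro ⟨h1, h2, h3⟩
          subst h1
          exact ⟨by rw [h2], Or.inr h3⟩
        · rintro ⟨h1, h2⟩
          simp only [List.cons.injEq] at h1
          obtain ⟨hca, hta⟩ := h1
          subst hca
          rcases h2 with h2 | h2
          · first | exact absurd h2 hc | exact absurd h2.symm hc
          · exact ⟨rfl, hta, h2⟩

theorem pvSegs_length (d : Char) (cs : List Char) :
    (pvSegs d cs).length = cs.count d + 1 := by
  induction cs with
  | nil => simp [pvSegs]
  | cons c cs ih =>
    by_cases hc : c = d <;>
      simp [pvSegs, hc, ih, List.length_tail]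

theorem pvA_iff (p : String) :
    is_valid_propname p = true ↔
      (((PySem.Chars.splitOn p.toList ['.']).headI = "pore".toList ∨
        (PySem.Chars.splitOn p.toList ['.']).headI = "throat".toList) ∧
       (PySem.Chars.splitOn p.toList ['.']).length ≠ 1 ∧
       ∀ f ∈ PySem.Chars.splitOn p.toList ['.'], f.length ≠ 0) := by
  simp only [is_valid_propname]
  split_ifs with h1 h2 h3 <;> simp_all
  exact ⟨by tauto, fun f hf hfe => h3 (hfe ▸ hf)⟩

theorem pvB_iff (p : String) :
    is_valid_propname_alt p = true ↔
      (("pore.".toList <+: p.toList ∨ "throat.".toList <+: p.toList) ∧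
       ¬ "..".toList <:+: p.toList ∧ ¬ ".".toList <:+ p.toList) := by
  simp only [is_valid_propname_alt, Bool.and_eq_true, Bool.or_eq_true, Bool.not_eq_true',
    PySem.Str.startswith_eq, PySem.Str.isIn_eq, PySem.Str.endswith_eq]
  rw [PySem.Chars.startswith_iff, PySem.Chars.startswith_iff]
  constructor
  · rintro ⟨⟨h1, h2⟩, h3⟩
    refine ⟨h1, by rwa [← PySem.Chars.isIn_eq_false_iff], ?_⟩
    exact fun hs => (Bool.eq_false_iff.mp h3) ((PySem.Chars.endswith_iff _ _).mpr hs)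
  · rintro ⟨h1, h2, h3⟩
    exact ⟨⟨h1, by rwa [PySem.Chars.isIn_eq_false_iff]⟩,
      Bool.eq_false_iff.mpr (fun ht => h3 ((PySem.Chars.endswith_iff _ _).mp ht))⟩


set_option maxRecDepth 4096 in
theorem pv_main (p : String) : is_valid_propname p = is_valid_propname_alt p := by
  rw [Bool.eq_iff_iff, pvA_iff, pvB_iff, splitOn_eq_pvSegs]
  have hall : (∀ f ∈ pvSegs '.' p.toList, f.length ≠ 0) ↔
      ((pvSegs '.' p.toList).headI ≠ [] ∧
        (((pvSegs '.' p.toList).tail.all fun f => !f.isEmpty) = true)) := by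
    conv_lhs => rw [← pvSegs_headI_cons_tail '.' p.toList]
    simp [List.length_eq_zero_iff]
  rw [hall, pvSegs_tail_all, pvSegs_headI, pvSegs_length]
  have hP := prefix_iff_takeWhile '.' "pore".toList p.toList (by simp)
  have hT := prefix_iff_takeWhile '.' "throat".toList p.toList (by simp)
  have e1 : ("pore.".toList : List Char) = "pore".toList ++ ['.'] := by decide
  have e2 : ("throat.".toList : List Char) = "throat".toList ++ ['.'] := by decide
  have e3 : ("..".toList : List Char) = ['.', '.'] := by decide
  have e4 : (".".toList : List Char) = ['.'] := by decide
  rw [e1, e2, e3, e4, hP, hT]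
  constructor
  · rintro ⟨hhead, hlen, hne, hdd, hsuf⟩
    have hmem : '.' ∈ p.toList := by
      rw [← List.count_pos_iff]
      omega
    have hnil : p.toList ≠ [] := by
      intro h0
      rw [h0] at hmem
      exact absurd hmem (by simp)
    refine ⟨hhead.imp (fun h => ⟨h, hmem⟩) (fun h => ⟨h, hmem⟩), hdd, ?_⟩
    rcases hsuf with h | h
    · exact absurd h hnil
    · exact h
  · rintro ⟨hpre, hdd, hsuf⟩
    have hmem : '.' ∈ p.toList := by
      rcases hpre with ⟨-, h⟩ | ⟨-, h⟩ <;> exact h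
    have hcnt : 0 < p.toList.count '.' := List.count_pos_iff.mpr hmem
    refine ⟨hpre.imp And.left And.left, by omega, ?_, hdd, Or.inr hsuf⟩
    rcases hpre with ⟨h, -⟩ | ⟨h, -⟩ <;> rw [h] <;> decide

-- ===== VERDICT (by name: the statement is the Claim_ definition above) =====
theorem is_valid_propname_spec : Claim_equal_is_valid_propname := by
  intro p _
  unfold Spec_is_valid_propname
  exact pv_main p
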